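-- pv_equiv track=rewrite | github.com/PerkiePai/COMPROG-2110101 | Grader_Exercise/Grader 3/exercise/09_MoreDC_34.py | pattern3
-- ===== SOURCE A (Python) =====
-- def pattern3(N):
--     l1=[]
--     cnt=1
--     for i in range(N):
--         l2=[]
--         for j in range(i):
--             l2.append(0)
--         for j in range(N-i):
--             l2.append(cnt)
--             cnt+=1
--         l1.append(l2)
--     return l1
-- ===== SOURCE B (Python) =====
-- def pattern3(N):
--     # Each cell has a closed form: row i starts after i*(2*N-i+1)//2 values
--     # have been emitted, so cell (i, j) with j >= i holds that offset + (j-i) + 1.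
--     def cell(i, j):
--         if j < i:
--             return 0
--         return i * (2 * N - i + 1) // 2 + (j - i) + 1
--     return [[cell(i, j) for j in range(N)] for i in range(N)]
-- ===== Notes on version B (the rewrite author's own statement) =====
-- stated objective: alternative
-- what changed: Replaces A's sequential running counter threaded through two nested append loops by a closed-form triangular-number formula that computes every cell independently from its row and column indices, so no state is carried between cells or rows.
import Mathlib
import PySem

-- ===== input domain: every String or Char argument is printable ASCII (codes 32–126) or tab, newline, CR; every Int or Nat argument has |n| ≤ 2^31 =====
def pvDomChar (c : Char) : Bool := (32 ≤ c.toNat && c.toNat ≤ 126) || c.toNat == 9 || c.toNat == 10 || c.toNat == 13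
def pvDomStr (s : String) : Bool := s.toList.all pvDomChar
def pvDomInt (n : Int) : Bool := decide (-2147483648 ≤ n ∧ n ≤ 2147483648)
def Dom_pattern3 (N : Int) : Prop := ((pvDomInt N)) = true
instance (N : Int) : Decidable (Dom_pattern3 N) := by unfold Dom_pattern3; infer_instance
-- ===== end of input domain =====

-- B computes every cell independently from a closed-form formula instead of threading a running counter.

-- ===== PORT A =====
def pattern3 (N : Int) : List (List Int) :=
  ((PySem.List.pyRange 0 N 1).foldl
    (fun (st : List (List Int) × Int) i =>
      let l2 : List Int := (PySem.List.pyRange 0 i 1).foldl (fun l2 _ => l2 ++ [(0 : Int)]) []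
      let p := (PySem.List.pyRange 0 (N - i) 1).foldl
        (fun (p : List Int × Int) _ => (p.1 ++ [p.2], p.2 + 1)) (l2, st.2)
      (st.1 ++ [p.1], p.2)) ([], 1)).1

-- ===== PORT B =====
def pattern3_alt (N : Int) : List (List Int) :=
  (PySem.List.pyRange 0 N 1).map (fun i =>
    (PySem.List.pyRange 0 N 1).map (fun j =>
      if j < i then (0 : Int)
      else PySem.Int.floordiv (i * (2 * N - i + 1)) 2 + (j - i) + 1))

-- ===== PRECONDITION & SPEC =====
def Spec_pattern3 (N : Int) (out : List (List Int)) : Prop := out = pattern3_alt N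
instance (N : Int) (out : List (List Int)) : Decidable (Spec_pattern3 N out) := by unfold Spec_pattern3; infer_instance

-- ===== CLAIM (what is proved, stated in full; the proofs are below) =====
def Claim_equal_pattern3 : Prop := ∀ (N : Int), Dom_pattern3 N → Spec_pattern3 N (pattern3 N)

-- ===== LEMMAS AND PROOFS =====

-- B's per-row offset: the number of values emitted before row i.
def offS (N i : Int) : Int := PySem.Int.floordiv (i * (2 * N - i + 1)) 2

-- The common intermediate form of a row: i zeros, then N-i consecutive values.
def rowClosed (N i : Int) : List Int :=
  List.replicate i.toNat (0 : Int) ++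
    PySem.List.pyRange (offS N i + 1) (offS N i + 1 + (N - i)) 1

lemma two_mul_offS (N i : Int) : 2 * offS N i = i * (2 * N - i + 1) := by
  have hev : Even (i * (2 * N - i + 1)) := by
    rcases Int.even_or_odd i with h | h
    · exact h.mul_right _
    · have h2 : Even (2 * N - i + 1) := by
        rcases h with ⟨m, hm⟩
        exact ⟨N - m, by omega⟩
      exact h2.mul_left _
  rcases hev with ⟨m, hm⟩
  unfold offS
  rw [PySem.Int.floordiv_eq_ediv_of_pos (by norm_num), hm]
  omega

lemma offS_step (N i : Int) : offS N (i + 1) = offS N i + (N - i) := by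
  have key : 2 * offS N (i + 1) = 2 * (offS N i + (N - i)) := by
    linear_combination two_mul_offS N (i + 1) - two_mul_offS N i
  omega

lemma offS_zero (N : Int) : offS N 0 = 0 := by
  have := two_mul_offS N 0
  omega

-- A's outer step, after evaluating the two inner loops in closed form.
def stepA (N : Int) (st : List (List Int) × Int) (i : Int) : List (List Int) × Int :=
  (st.1 ++ [List.replicate i.toNat (0 : Int) ++ PySem.List.pyRange st.2 (st.2 + (N - i)) 1],
   st.2 + (N - i))

lemma innerFill {α : Type} (l : List α) : ∀ (l2 : List Int) (c : Int),
    l.foldl (fun (p : List Int × Int) _ => (p.1 ++ [p.2], p.2 + 1)) (l2, c)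
      = (l2 ++ PySem.List.pyRange c (c + l.length) 1, c + l.length) := by
  induction l with
  | nil =>
      intro l2 c
      simp [PySem.List.pyRange_one_eq_nil (le_refl c)]
  | cons x xs ih =>
      intro l2 c
      simp only [List.foldl_cons, List.length_cons, ih]
      have hc : c < c + ((xs.length : Int) + 1) := by omega
      rw [show c + ((((xs.length : Nat) + 1) : Nat) : Int) = c + ((xs.length : Int) + 1) by push_cast; ring]
      rw [PySem.List.pyRange_one_cons hc,
        show c + 1 + (xs.length : Int) = c + ((xs.length : Int) + 1) by ring]
      simp

-- A's program equals the foldl of stepA: evaluate the two inner loops.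
lemma pattern3_eq_stepA (N : Int) :
    pattern3 N = ((PySem.List.pyRange 0 N 1).foldl (stepA N) ([], 1)).1 := by
  unfold pattern3
  apply congrArg Prod.fst
  apply PySem.List.foldl_congr_mem
  intro acc i hi
  have hmem := (PySem.List.mem_pyRange_one).1 hi
  simp only [PySem.List.foldl_append_singleton_eq_map, List.nil_append,
    innerFill, PySem.List.length_pyRange_one, stepA]
  have h1 : (PySem.List.pyRange 0 i 1).map (fun _ => (0 : Int))
      = List.replicate i.toNat (0 : Int) := by
    rw [List.map_const']
    congr 1
    rw [PySem.List.length_pyRange_one]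
    omega
  have h2 : ((N - i - 0).toNat : Int) = N - i := by omega
  rw [h1, h2]

-- The foldl of stepA, started with the counter in step with offS, produces the closed rows.
lemma mainLoop (N : Int) (k : Nat) : ∀ (acc : List (List Int)),
    ((PySem.List.pyRange (N - k) N 1).foldl (stepA N) (acc, offS N (N - k) + 1)).1
      = acc ++ (PySem.List.pyRange (N - k) N 1).map (rowClosed N) := by
  induction k with
  | zero =>
      intro acc
      rw [PySem.List.pyRange_one_eq_nil (by omega)]
      simp
  | succ k ih =>
      intro acc
      have hcast : (((k : Nat) + 1 : Nat) : Int) = (k : Int) + 1 := by push_cast; ring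
      rw [hcast]
      set i : Int := N - ((k : Int) + 1) with hi
      have hlt : i < N := by omega
      rw [PySem.List.pyRange_one_cons hlt]
      simp only [List.foldl_cons, List.map_cons]
      have hstep : stepA N (acc, offS N i + 1) i = (acc ++ [rowClosed N i], offS N (i + 1) + 1) := by
        simp only [stepA, rowClosed, Prod.mk.injEq]
        constructor
        · trivial
        · rw [offS_step]; ring
      rw [hstep, show i + 1 = N - (k : Int) from by omega]
      rw [ih (acc ++ [rowClosed N i])]
      simp

lemma pattern3_eq_rowClosed (N : Int) :
    pattern3 N = (PySem.List.pyRange 0 N 1).map (rowClosed N) := by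
  rw [pattern3_eq_stepA]
  by_cases h : N ≤ 0
  · rw [PySem.List.pyRange_one_eq_nil h]; rfl
  · have h0 : N - (N.toNat : Int) = 0 := by omega
    have := mainLoop N N.toNat []
    rw [h0, offS_zero] at this
    simpa using this

-- Each of B's rows coincides with the closed row.
lemma rowB (N i : Int) (h0 : 0 ≤ i) (hN : i ≤ N) :
    (PySem.List.pyRange 0 N 1).map (fun j =>
        if j < i then (0 : Int)
        else PySem.Int.floordiv (i * (2 * N - i + 1)) 2 + (j - i) + 1)
      = rowClosed N i := by
  rw [PySem.List.pyRange_one_append 0 i N h0 hN, List.map_append]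
  unfold rowClosed
  congr 1
  · -- below-diagonal part: all zeros
    rw [List.map_congr_left (g := fun _ => (0 : Int)) ?_, List.map_const']
    · congr 1
      rw [PySem.List.length_pyRange_one]
      omega
    · intro j hj
      have := (PySem.List.mem_pyRange_one).1 hj
      simp only [if_pos this.2]
  · -- diagonal-and-right part: consecutive values
    rw [List.map_congr_left
        (g := fun j => PySem.Int.floordiv (i * (2 * N - i + 1)) 2 + (j - i) + 1) ?_]
    · rw [PySem.List.pyRange_one, PySem.List.pyRange_one, List.map_map]
      have hlen : (offS N i + 1 + (N - i) - (offS N i + 1)).toNat = (N - i).toNat := by omega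
      rw [hlen]
      apply List.map_congr_left
      intro k _
      simp only [Function.comp, offS]
      ring
    · intro j hj
      have := (PySem.List.mem_pyRange_one).1 hj
      simp only [if_neg (by omega : ¬ j < i)]

-- ===== VERDICT (by name: the statement is the Claim_ definition above) =====
theorem pattern3_spec : Claim_equal_pattern3 := by
  intro N _
  unfold Spec_pattern3
  rw [pattern3_eq_rowClosed]
  unfold pattern3_alt
  apply List.map_congr_left
  intro i hi
  have h := (PySem.List.mem_pyRange_one).1 hi
  exact (rowB N i h.1 (le_of_lt h.2)).symm
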